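-- pv_equiv track=rewrite | github.com/JiayangLai/doudizhuSim | utils.py | cn3
-- ===== SOURCE A (Python) =====
-- def cn3(lista):
--     listcn3=[]
--     listb=lista[:]
--     for i in lista:
--         listb.remove(i)
--         listc=listb[:]
--         for j in listb:
--             listc.remove(j)
--             for k in listc:
--                 listcn3 = listcn3+[[i,j,k]]
--     return listcn3
-- ===== SOURCE B (Python) =====
-- import itertools
--
-- def cn3(lista):
--     return [list(c) for c in itertools.combinations(lista, 3)]
-- ===== Notes on version B (the rewrite author's own statement) =====
-- stated objective: idiomatic
-- what changed: Replaces A's three nested copy-and-remove-by-value loops, which rebuild the whole accumulator on every append, with a single call to itertools.combinations(lista, 3), mapping each tuple to a list.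
import Mathlib
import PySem

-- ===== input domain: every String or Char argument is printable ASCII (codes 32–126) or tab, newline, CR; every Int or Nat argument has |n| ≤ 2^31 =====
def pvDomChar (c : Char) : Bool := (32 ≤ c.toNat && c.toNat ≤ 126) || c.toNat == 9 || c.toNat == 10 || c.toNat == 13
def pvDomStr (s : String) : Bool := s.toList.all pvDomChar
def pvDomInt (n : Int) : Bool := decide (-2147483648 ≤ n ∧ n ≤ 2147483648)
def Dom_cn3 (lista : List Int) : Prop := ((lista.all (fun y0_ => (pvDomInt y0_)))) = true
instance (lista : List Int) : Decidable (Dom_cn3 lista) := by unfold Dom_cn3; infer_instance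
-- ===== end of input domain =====

-- B replaces A's copy-and-remove-by-value nested loops with the standard combinations
-- generator (itertools.combinations(lista, 3)); same triples in the same order (idiomatic).

-- ===== PORT A =====
-- Three nested loops over shrinking copies; `.remove` ports to PySem.List.remove?.
-- The `.getD` fallback is dead code: in this loop the removed element is always present
-- (the iterated list is the list being removed from), so Python never raises ValueError.
def cn3 (lista : List Int) : List (List Int) :=
  (lista.foldl (fun (st : List (List Int) × List Int) i =>
      let listb := (PySem.List.remove? st.2 i).getD st.2
      let st2 := listb.foldl (fun (st' : List (List Int) × List Int) j =>
          let listc := (PySem.List.remove? st'.2 j).getD st'.2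
          (listc.foldl (fun acc k => acc ++ [[i, j, k]]) st'.1, listc))
        (st.1, listb)
      (st2.1, listb))
    ([], lista)).1

-- ===== PORT B =====
-- itertools.combinations(lista, 2) / (lista, 3): standard recursive characterisation,
-- lexicographic in positions.
def pairs2 : List Int → List (List Int)
  | [] => []
  | j :: rest => rest.map (fun k => [j, k]) ++ pairs2 rest

def cn3_alt : List Int → List (List Int)
  | [] => []
  | i :: rest => (pairs2 rest).map (fun p => i :: p) ++ cn3_alt rest

-- ===== PRECONDITION & SPEC =====
def Spec_cn3 (lista : List Int) (out : List (List Int)) : Prop := out = cn3_alt lista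
instance (lista : List Int) (out : List (List Int)) : Decidable (Spec_cn3 lista out) := by unfold Spec_cn3; infer_instance

-- ===== CLAIM (what is proved, stated in full; the proofs are below) =====
def Claim_equal_cn3 : Prop := ∀ (lista : List Int), Dom_cn3 lista → Spec_cn3 lista (cn3 lista)

-- ===== LEMMAS AND PROOFS =====

theorem cn3_inner3 (listc : List Int) (acc : List (List Int)) (i j : Int) :
    listc.foldl (fun acc k => acc ++ [[i, j, k]]) acc
      = acc ++ listc.map (fun k => [i, j, k]) := by
  induction listc generalizing acc with
  | nil => simp
  | cons k rest ih => simp [List.foldl, ih]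

-- middle loop: iterating listb while removing from its copy listc walks down the suffixes
theorem cn3_inner2 (l : List Int) (acc : List (List Int)) (i : Int) :
    (l.foldl (fun (st' : List (List Int) × List Int) j =>
        let listc := (PySem.List.remove? st'.2 j).getD st'.2
        (listc.foldl (fun acc k => acc ++ [[i, j, k]]) st'.1, listc))
      (acc, l)).1 = acc ++ (pairs2 l).map (fun p => i :: p) := by
  induction l generalizing acc with
  | nil => simp [pairs2]
  | cons j rest ih =>
      simp only [List.foldl, PySem.List.remove?_cons_self, Option.getD_some]
      rw [ih, cn3_inner3]
      simp [pairs2, Function.comp]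

theorem cn3_outer (l : List Int) (acc : List (List Int)) :
    (l.foldl (fun (st : List (List Int) × List Int) i =>
        let listb := (PySem.List.remove? st.2 i).getD st.2
        let st2 := listb.foldl (fun (st' : List (List Int) × List Int) j =>
            let listc := (PySem.List.remove? st'.2 j).getD st'.2
            (listc.foldl (fun acc k => acc ++ [[i, j, k]]) st'.1, listc))
          (st.1, listb)
        (st2.1, listb))
      (acc, l)).1 = acc ++ cn3_alt l := by
  induction l generalizing acc with
  | nil => simp [cn3_alt]
  | cons i rest ih =>
      simp only [List.foldl, PySem.List.remove?_cons_self, Option.getD_some]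
      rw [cn3_inner2, ih, cn3_alt]
      simp

-- ===== VERDICT (by name: the statement is the Claim_ definition above) =====
theorem cn3_spec : Claim_equal_cn3 := by
  intro lista _
  unfold Spec_cn3 cn3
  rw [cn3_outer]
  simp
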